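-- pv_equiv track=rewrite | github.com/Pavan-Gawande/Daily_Programming_Challange_2024 | Day22_Get_Array_Element_Repeating_K_Times.py | Get_Array_Element
-- ===== SOURCE A (Python) =====
-- def Get_Array_Element(arr, k):
--     d = {}
--     k_list = []
--     n = len(arr)
--     if(n==1 and k==1):
--         return arr[0]
--     for i in arr:
--         if(i in d):
--             d[i] += 1
--             if(d[i] == k):
--                 k_list.append(i)
--         else:
--             d[i] = 1
--     for ele in k_list:
--         if(d[ele] == k):
--             return ele
--     return -1
-- ===== SOURCE B (Python) =====
-- def Get_Array_Element(arr, k):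
--     for i, x in enumerate(arr):
--         if arr[:i+1].count(x) == k and arr.count(x) == k:
--             return x
--     return -1
-- ===== Notes on version B (the rewrite author's own statement) =====
-- stated objective: simpler
-- what changed: B drops the hash table entirely: a single enumerate loop decides each position by brute-force counting on the list itself (prefix count == k and total count == k), instead of A's incremental dict counting with a candidate list filtered by a second pass.
-- intended difference: For k=1 on arrays of length >= 2 that contain an element occurring exactly once (whose first such element is not -1), A returns -1 because its candidate list is only fed on repeat occurrences, while B returns that first exactly-once element, which is the intended answer to 'element repeating k times' for k=1. — e.g. on Get_Array_Element([1, 2, 2], 1): A returns -1, B returns 1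
import Mathlib
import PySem

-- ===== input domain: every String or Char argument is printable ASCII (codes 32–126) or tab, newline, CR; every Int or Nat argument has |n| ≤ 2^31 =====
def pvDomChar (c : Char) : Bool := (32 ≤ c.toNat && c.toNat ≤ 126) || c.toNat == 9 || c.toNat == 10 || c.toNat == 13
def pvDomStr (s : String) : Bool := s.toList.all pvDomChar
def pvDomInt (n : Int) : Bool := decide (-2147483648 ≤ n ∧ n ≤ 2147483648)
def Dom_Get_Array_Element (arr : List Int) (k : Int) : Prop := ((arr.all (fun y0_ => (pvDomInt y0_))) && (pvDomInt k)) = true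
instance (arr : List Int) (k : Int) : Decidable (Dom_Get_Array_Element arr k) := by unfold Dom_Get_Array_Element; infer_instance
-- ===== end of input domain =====

-- B drops A's dict-plus-candidate-list machinery for a single brute-force enumerate loop counting
-- on the list itself (alternative decomposition, quadratic but far simpler); for k = 1 on
-- non-singleton arrays B returns the first exactly-once element where A returns -1 (the intended
-- difference stated in D_ below).


-- ===== PORT A =====
-- one iteration of A's counting loop (state: the dict d and the candidate list k_list)
def aStep (k : Int) (s : PySem.Dict Int Int × List Int) (i : Int) : PySem.Dict Int Int × List Int :=
  if s.1.contains i then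
    let d := s.1.insert i (s.1.getD i 0 + 1)     -- d[i] += 1   (key present, so getD is exact)
    if d.getD i 0 = k then (d, s.2 ++ [i]) else (d, s.2)
  else (s.1.insert i 1, s.2)

-- A's second loop: first ele in k_list with d[ele] == k, else -1 (every ele is a key of d)
def aFind (d : PySem.Dict Int Int) (k : Int) : List Int → Int
  | [] => -1
  | e :: rest => if d.getD e 0 = k then e else aFind d k rest

def Get_Array_Element (arr : List Int) (k : Int) : Int :=
  if arr.length = 1 ∧ k = 1 then arr.headI     -- arr[0], in range since len = 1
  else
    let s := arr.foldl (aStep k) (PySem.Dict.empty, [])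
    aFind s.1 k s.2

-- ===== PORT B =====
-- B's loop over enumerate(arr): at index i, element x, return x if arr[:i+1].count(x) == k and
-- arr.count(x) == k
def altLoop (arr : List Int) (k : Int) : List (Int × Int) → Int
  | [] => -1
  | (i, x) :: rest =>
    if ((PySem.List.slice arr none (some (i + 1))).count x : Int) = k ∧ (arr.count x : Int) = k
    then x else altLoop arr k rest

def Get_Array_Element_alt (arr : List Int) (k : Int) : Int :=
  altLoop arr k (PySem.List.enumerate arr 0)

-- ===== PRECONDITION & SPEC =====
-- For k = 1 on arrays of length ≥ 2 containing an element that occurs exactly once (and whose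
-- first such element is not -1, A's not-found sentinel), A returns -1 — its candidate list is
-- only fed on repeat occurrences — while B returns that first exactly-once element, which is the
-- intended answer to "element repeating k times" for k = 1.
def D_Get_Array_Element (arr : List Int) (k : Int) : Prop :=
  k = 1 ∧ 2 ≤ arr.length ∧ (arr.find? (fun y => arr.count y == 1)).getD (-1) ≠ -1
instance (arr : List Int) (k : Int) : Decidable (D_Get_Array_Element arr k) := by
  unfold D_Get_Array_Element; infer_instance

def Spec_Get_Array_Element (arr : List Int) (k : Int) (out : Int) : Prop :=
  ¬ D_Get_Array_Element arr k → out = Get_Array_Element_alt arr k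
instance (arr : List Int) (k : Int) (out : Int) : Decidable (Spec_Get_Array_Element arr k out) := by
  unfold Spec_Get_Array_Element; infer_instance

def pvDiffWitness_Get_Array_Element : List Int × Int := ([1, 2, 2], 1)
def pvDiffWitnessOut_Get_Array_Element : Int × Int := (-1, 1)

-- ===== CLAIM (what is proved, stated in full; the proofs are below) =====
def Claim_unchanged_Get_Array_Element : Prop := ∀ (arr : List Int) (k : Int), Dom_Get_Array_Element arr k → Spec_Get_Array_Element arr k (Get_Array_Element arr k)
def Claim_changed_Get_Array_Element : Prop := Dom_Get_Array_Element (pvDiffWitness_Get_Array_Element.1) (pvDiffWitness_Get_Array_Element.2) ∧ D_Get_Array_Element (pvDiffWitness_Get_Array_Element.1) (pvDiffWitness_Get_Array_Element.2) ∧ Get_Array_Element (pvDiffWitness_Get_Array_Element.1) (pvDiffWitness_Get_Array_Element.2) = pvDiffWitnessOut_Get_Array_Element.1 ∧ Get_Array_Element_alt (pvDiffWitness_Get_Array_Element.1) (pvDiffWitness_Get_Array_Element.2) = pvDiffWitnessOut_Get_Array_Element.2 ∧ pvDiffWitnessOut_Get_Array_Element.1 ≠ pvDiffWitnessOut_Ge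t_Array_Element.2
def Claim_exact_Get_Array_Element : Prop := ∀ (arr : List Int) (k : Int), Dom_Get_Array_Element arr k → D_Get_Array_Element arr k → Get_Array_Element arr k ≠ Get_Array_Element_alt arr k

-- ===== LEMMAS AND PROOFS =====

-- pure specification of A's k_list: x is appended at the occurrence that makes its count reach k,
-- and only in the "already seen" branch (x ∈ p)
def kListSpec (k : Int) : List Int → List Int → List Int
  | [], _ => []
  | x :: rest, p =>
    (if ((p.count x : Int) + 1 = k ∧ x ∈ p) then [x] else []) ++ kListSpec k rest (p ++ [x])

-- pure specification of A's second loop over the final counts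
def find2 (full : List Int) (k : Int) : List Int → Int
  | [] => -1
  | x :: l => if (full.count x : Int) = k then x else find2 full k l

-- common specification both ports are reduced to: first x (by position) whose prefix count
-- reaches k there and whose total count is k
def scanSpec (full : List Int) (k : Int) : List Int → List Int → Int
  | [], _ => -1
  | x :: rest, p =>
    if ((p.count x : Int) + 1 = k ∧ (full.count x : Int) = k) then x
    else scanSpec full k rest (p ++ [x])

lemma count_append_singleton (p : List Int) (x v : Int) :
    ((p ++ [x]).count v : Int) = (p.count v : Int) + (if v = x then 1 else 0) := by
  by_cases h : v = x
  · simp [h, List.count_append]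
  · simp [h, List.count_append, Ne.symm h]

-- invariant of A's first loop: the dict is the prefix counter, k_list accumulates kListSpec
lemma aLoop (k : Int) : ∀ (rest p : List Int) (d : PySem.Dict Int Int) (kl : List Int),
    (∀ v, d.getD v 0 = (p.count v : Int)) →
    (∀ v, d.contains v = decide (v ∈ p)) →
    (∀ v, (rest.foldl (aStep k) (d, kl)).1.getD v 0 = ((p ++ rest).count v : Int)) ∧
      (rest.foldl (aStep k) (d, kl)).2 = kl ++ kListSpec k rest p := by
  intro rest
  induction rest with
  | nil => intro p d kl hg _; simpa [kListSpec] using hg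
  | cons x rest ih =>
    intro p d kl hg hc
    have hassoc : p ++ x :: rest = (p ++ [x]) ++ rest := by simp
    have hc' : ∀ (w : Int) (v : Int), (d.insert x w).contains v = decide (v ∈ p ++ [x]) := by
      intro w v
      rw [PySem.Dict.contains_insert]
      by_cases h : v = x <;> simp [h, hc]
    by_cases hx : d.contains x = true
    · have hxp : x ∈ p := by have := hc x; rw [hx] at this; exact of_decide_eq_true this.symm
      have hg' : ∀ v, (d.insert x (d.getD x 0 + 1)).getD v 0 = ((p ++ [x]).count v : Int) := by
        intro v
        rw [PySem.Dict.getD_insert, count_append_singleton]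
        by_cases h : v = x <;> simp [h, hg]
      by_cases hck : (d.insert x (d.getD x 0 + 1)).getD x 0 = k
      · have hk' : (p.count x : Int) + 1 = k := by
          rw [hg' x, count_append_singleton] at hck; simpa using hck
        have H := ih (p ++ [x]) (d.insert x (d.getD x 0 + 1)) (kl ++ [x]) hg' (hc' _)
        simp only [List.foldl_cons, aStep, hx, hck, if_pos]
        refine ⟨fun v => ?_, ?_⟩
        · rw [hassoc]; exact H.1 v
        · rw [H.2, kListSpec]
          simp [hk', hxp]
      · have H := ih (p ++ [x]) (d.insert x (d.getD x 0 + 1)) kl hg' (hc' _)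
        simp only [List.foldl_cons, aStep, hx, hck, if_pos, if_false]
        refine ⟨fun v => ?_, ?_⟩
        · rw [hassoc]; exact H.1 v
        · rw [H.2, kListSpec]
          have : ¬(((p.count x : Int) + 1 = k) ∧ x ∈ p) := by
            rintro ⟨h1, _⟩
            apply hck
            rw [hg' x, count_append_singleton]; simpa using h1
          simp [this]
    · have hxp : x ∉ p := by
        have := hc x
        simp only [Bool.not_eq_true] at hx
        rw [hx] at this
        exact of_decide_eq_false this.symm
      have hp0 : p.count x = 0 := List.count_eq_zero.mpr hxp
      have hg1 : ∀ v, (d.insert x 1).getD v 0 = ((p ++ [x]).count v : Int) := by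
        intro v
        rw [PySem.Dict.getD_insert, count_append_singleton]
        by_cases h : v = x <;> simp [h, hg, hp0]
      have H := ih (p ++ [x]) (d.insert x 1) kl hg1 (hc' _)
      simp only [List.foldl_cons, aStep, hx, Bool.false_eq_true, if_false]
      refine ⟨fun v => ?_, ?_⟩
      · rw [hassoc]; exact H.1 v
      · rw [H.2, kListSpec]
        simp [hxp]

-- A's second loop over the final dict is find2 over the full counts
lemma aFind_eq_find2 (d : PySem.Dict Int Int) (full : List Int) (k : Int)
    (h : ∀ v, d.getD v 0 = (full.count v : Int)) : ∀ l, aFind d k l = find2 full k l := by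
  intro l
  induction l with
  | nil => rfl
  | cons x l ih => simp [aFind, find2, h x, ih]

-- A's value, outside the special-cased guard
lemma A_eq (arr : List Int) (k : Int) (hg : ¬(arr.length = 1 ∧ k = 1)) :
    Get_Array_Element arr k = find2 arr k (kListSpec k arr []) := by
  have H := aLoop k arr [] PySem.Dict.empty []
      (fun v => by simp [PySem.Dict.getD_empty])
      (fun v => by simp [PySem.Dict.contains_empty])
  unfold Get_Array_Element
  rw [if_neg hg]
  have h1 : ∀ v, (arr.foldl (aStep k) (PySem.Dict.empty, [])).1.getD v 0 = (arr.count v : Int) := by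
    intro v; simpa using H.1 v
  rw [aFind_eq_find2 _ arr k h1, H.2, List.nil_append]

-- B's enumerate loop matches scanSpec: at position p.length the prefix slice arr[:i+1] is p ++ [x]
lemma bLoop (arr : List Int) (k : Int) : ∀ (rest p : List Int), arr = p ++ rest →
    altLoop arr k (PySem.List.enumerate rest (p.length : Int)) = scanSpec arr k rest p := by
  intro rest
  induction rest with
  | nil => intro p _; simp [PySem.List.enumerate_nil, altLoop, scanSpec]
  | cons x rest ih =>
    intro p harr
    rw [PySem.List.enumerate_cons]
    have hslice : PySem.List.slice arr none (some ((p.length : Int) + 1)) = p ++ [x] := by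
      have : ((p.length : Int) + 1) = ((p.length + 1 : Nat) : Int) := by push_cast; ring
      rw [this, PySem.List.slice_to_natCast, harr, List.take_append]
      simp
    have hcnt : (((p ++ [x]).count x : Int)) = (p.count x : Int) + 1 := by
      rw [count_append_singleton]; simp
    simp only [altLoop, hslice, hcnt, scanSpec]
    split_ifs with h
    · rfl
    · have : ((p.length : Int) + 1) = (((p ++ [x]).length : Nat) : Int) := by
        simp
      rw [this]
      exact ih (p ++ [x]) (by simpa using harr)

-- B's value
lemma B_eq (arr : List Int) (k : Int) :
    Get_Array_Element_alt arr k = scanSpec arr k arr [] := by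
  unfold Get_Array_Element_alt
  exact bLoop arr k arr [] rfl

-- for k ≠ 1 the two specifications agree everywhere
lemma main_ne_one (full : List Int) (k : Int) (hk : k ≠ 1) :
    ∀ rest p, find2 full k (kListSpec k rest p) = scanSpec full k rest p := by
  intro rest
  induction rest with
  | nil => intro p; rfl
  | cons x rest ih =>
    intro p
    by_cases hc : (p.count x : Int) + 1 = k
    · by_cases hm : x ∈ p
      · rw [kListSpec, scanSpec, if_pos ⟨hc, hm⟩, List.singleton_append, find2]
        by_cases ht : (full.count x : Int) = k
        · rw [if_pos ht, if_pos ⟨hc, ht⟩]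
        · rw [if_neg ht, if_neg (by rintro ⟨-, h2⟩; exact ht h2), ih]
      · exfalso
        have : p.count x = 0 := List.count_eq_zero.mpr hm
        apply hk; omega
    · rw [kListSpec, scanSpec, if_neg (by rintro ⟨h1, _⟩; exact hc h1),
          if_neg (by rintro ⟨h1, _⟩; exact hc h1), List.nil_append, ih]

-- for k = 1 A's candidate list is empty
lemma kListSpec_one : ∀ rest p : List Int, kListSpec 1 rest p = [] := by
  intro rest
  induction rest with
  | nil => intro p; rfl
  | cons x rest ih =>
    intro p
    have h : ¬(((p.count x : Int) + 1 = 1) ∧ x ∈ p) := by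
      rintro ⟨h1, h2⟩
      have := List.count_pos_iff.mpr h2
      omega
    rw [kListSpec, if_neg h, List.nil_append, ih]

-- for k = 1 B's scan returns the first element occurring exactly once (or -1)
lemma scanSpec_one (full : List Int) : ∀ rest p : List Int, p ++ rest = full →
    scanSpec full 1 rest p = (rest.find? (fun y => full.count y == 1)).getD (-1) := by
  intro rest
  induction rest with
  | nil => intro p _; rfl
  | cons x rest ih =>
    intro p h
    by_cases ht : full.count x = 1
    · have hp : p.count x = 0 := by
        have h1 : full.count x = p.count x + (x :: rest).count x := by
          rw [← h, List.count_append]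
        have h2 : 1 ≤ (x :: rest).count x := by simp
        omega
      rw [scanSpec, if_pos (by constructor <;> [omega; exact_mod_cast ht]),
          List.find?_cons_of_pos (by simpa using ht)]
      rfl
    · rw [scanSpec, if_neg (by rintro ⟨_, h1⟩; exact ht (by exact_mod_cast h1)),
          List.find?_cons_of_neg (by simpa using ht)]
      exact ih (p ++ [x]) (by simpa using h)

-- ===== VERDICT (by name: the statements are the Claim_ definitions above) =====
theorem Get_Array_Element_spec : Claim_unchanged_Get_Array_Element := by
  unfold Claim_unchanged_Get_Array_Element
  intro arr k _ hD
  by_cases hg : arr.length = 1 ∧ k = 1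
  · obtain ⟨a, rfl⟩ := List.length_eq_one_iff.mp hg.1
    obtain ⟨-, rfl⟩ := hg
    rw [B_eq]
    simp [Get_Array_Element, scanSpec]
  · rw [A_eq arr k hg, B_eq]
    by_cases hk : k = 1
    · subst hk
      rw [kListSpec_one, scanSpec_one arr arr [] rfl]
      simp only [D_Get_Array_Element, ne_eq, not_and, not_not, forall_const] at hD
      rcases Nat.lt_or_ge arr.length 2 with hl | hl
      · match arr, hg, hl with
        | [], _, _ => rfl
        | [a], hg, _ => exact absurd ⟨rfl, rfl⟩ hg
        | _ :: _ :: _, _, hl => simp at hl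
      · rw [hD hl]
        rfl
    · rw [main_ne_one arr k hk]

theorem Get_Array_Element_changed : Claim_changed_Get_Array_Element := by
  unfold Claim_changed_Get_Array_Element; decide

theorem Get_Array_Element_tight : Claim_exact_Get_Array_Element := by
  unfold Claim_exact_Get_Array_Element
  intro arr k _ hDD
  obtain ⟨hk, hl, hX⟩ := hDD
  subst hk
  have hg : ¬(arr.length = 1 ∧ (1 : Int) = 1) := by
    rintro ⟨h1, -⟩; omega
  rw [A_eq arr 1 hg, kListSpec_one, B_eq, scanSpec_one arr arr [] rfl]
  exact fun h => hX h.symm
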